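-- pv_equiv track=rewrite | github.com/ItaloPussi/advent-of-code | 2023/day08/main.py | get_single_total_steps
-- ===== SOURCE A (Python) =====
-- from typing import Tuple, List, Dict
--
-- def get_single_total_steps(position: str, allowed_objectives: List[str], dict_map: Dict[str, Tuple[str, str]], directions: List[str]) -> int:
--     """
--     Calculates the number of steps needed to reach any of the allowed objectives
--     from a given starting position, following the specified directions.
--
--     Parameters:
--     - position (str): The starting position.
--     - allowed_objectives (List[str]): List of allowed objective positions.
--     - dict_map (Dict[str, Tuple[str, str]]): A dictionary mapping starting
--       positions to tuples of left and right positions.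
--     - directions (List[str]): List of directions to follow ("L" or "R").
--
--     Returns:
--     - int: The total number of steps needed.
--     """
--
--     steps = 0
--     current_position = position
--     current_direction_index = 0
--
--     while current_position not in allowed_objectives:
--         steps += 1
--
--         direction_index = 0
--         if directions[current_direction_index] == "R":
--             direction_index = 1
--
--         current_position = dict_map[current_position][direction_index]
--
--         current_direction_index = current_direction_index + \
--             1 if current_direction_index < len(directions) - 1 else 0
--
--     return steps
-- ===== SOURCE B (Python) =====
-- def get_single_total_steps(position, allowed_objectives, dict_map, directions):
--     objectives = set(allowed_objectives)
--     if position in objectives: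
--         return 0
--
--     def summarize_round(node):
--         # Walk one full pass of directions from node; report the offset (1-based)
--         # at which an objective is first reached, or the node ending the round.
--         cur = node
--         for off, d in enumerate(directions, 1):
--             cur = dict_map[cur][1 if d == "R" else 0]
--             if cur in objectives:
--                 return (off, cur)
--         return (None, cur)
--
--     round_cache = {}  # node -> (hit offset or None, end-of-round node), memoized
--     steps = 0
--     current = position
--     while True:
--         if current not in round_cache:
--             round_cache[current] = summarize_round(current)
--         hit, end = round_cache[current]
--         if hit is not None:
--             return steps + hit
--         steps += len(directions)
--         current = end
-- ===== Notes on version B (the rewrite author's own statement) =====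
-- stated objective: alternative
-- what changed: Replaces A's step-by-step walk with modular direction-index bookkeeping by a memoized round-jump table: each visited round-start node is summarized once (first-hit offset within one full pass of directions, plus the end-of-round node), and the main loop advances whole rounds through the cache, returning steps plus the cached offset.
import Mathlib
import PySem

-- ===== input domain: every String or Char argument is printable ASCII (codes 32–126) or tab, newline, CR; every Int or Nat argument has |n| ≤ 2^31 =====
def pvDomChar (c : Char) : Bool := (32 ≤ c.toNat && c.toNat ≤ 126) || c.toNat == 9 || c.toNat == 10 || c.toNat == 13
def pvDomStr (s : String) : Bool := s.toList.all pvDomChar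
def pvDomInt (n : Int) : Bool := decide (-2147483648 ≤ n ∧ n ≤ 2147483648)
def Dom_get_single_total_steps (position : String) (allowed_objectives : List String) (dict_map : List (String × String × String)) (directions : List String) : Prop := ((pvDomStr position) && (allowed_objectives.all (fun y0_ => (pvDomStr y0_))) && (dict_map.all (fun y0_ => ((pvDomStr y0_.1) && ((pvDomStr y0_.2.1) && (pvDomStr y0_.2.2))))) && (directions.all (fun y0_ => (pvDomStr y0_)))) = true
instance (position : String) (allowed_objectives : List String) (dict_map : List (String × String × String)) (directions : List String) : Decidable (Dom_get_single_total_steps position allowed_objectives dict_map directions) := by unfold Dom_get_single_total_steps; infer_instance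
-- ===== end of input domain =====

-- B replaces A's step-by-step walk (with its manual direction-index increment and wrap)
-- by a memoized round-jump table: every round-start node is summarized ONCE (first-hit
-- offset within one full pass of directions, plus the end-of-round node) and the main
-- loop advances whole rounds through that cache, returning steps + the cached offset.

-- dict lookup on the association list (first match = Python dict with unique keys)
def pyLookup (dict_map : List (String × String × String)) (k : String) : Option (String × String) :=
  (dict_map.find? (fun e => e.1 == k)).map (·.2)

-- Fuel: A's loop state is (position, direction index), drawn from a finite set of at most
-- (2*|dict_map|+1)*(|directions|+1) values; by pigeonhole, if A's while-loop returns at all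
-- it returns within that many steps, so this fuel never runs out on inputs where A returns.
def pvFuel (dict_map : List (String × String × String)) (directions : List String) : Nat :=
  (2 * dict_map.length + 2) * (directions.length + 2) + 2

-- ===== PORT A =====
-- A's while-loop, step for step; fuel-out default 0 is unreachable under Pre_;
-- pyGetD/getD defaults stand for IndexError/KeyError, excluded by Pre_.
def goA (allowed_objectives : List String) (dict_map : List (String × String × String)) (directions : List String) : Nat → Int → String → Int → Int
  | 0, steps, _, _ => steps
  | fuel + 1, steps, current_position, current_direction_index =>
    if current_position ∈ allowed_objectives then steps
    else
      -- direction_index = 0; if directions[i] == "R": direction_index = 1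
      let direction_index : Int :=
        if PySem.List.pyGetD directions current_direction_index "" = "R" then 1 else 0
      let pair := (pyLookup dict_map current_position).getD ("", "")
      -- tuple [0]/[1]
      let current_position' := if direction_index = 1 then pair.2 else pair.1
      let current_direction_index' : Int :=
        if current_direction_index < PySem.List.len directions - 1 then current_direction_index + 1 else 0
      goA allowed_objectives dict_map directions fuel (steps + 1) current_position' current_direction_index'

def get_single_total_steps (position : String) (allowed_objectives : List String) (dict_map : List (String × String × String)) (directions : List String) : Int :=
  goA allowed_objectives dict_map directions (pvFuel dict_map directions) 0 position 0

-- ===== PORT B =====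
-- summarize_round: one full pass of directions from node (offset counter starts at 1);
-- (some off, hit-node) if an objective is first reached at 1-based offset off, else (none, end node)
def summarizeRound (objectives : PySem.Set String) (dict_map : List (String × String × String)) : List String → Int → String → (Option Int × String)
  | [], _, cur => (none, cur)
  | d :: ds, off, cur =>
    let pair := (pyLookup dict_map cur).getD ("", "")
    let cur' := if d = "R" then pair.2 else pair.1
    if PySem.Set.contains objectives cur' then (some off, cur')
    else summarizeRound objectives dict_map ds (off + 1) cur'

-- the 'while True' main loop with the memo dict round_cache (fuel-out default is unreachable under Pre_)
def goB (objectives : PySem.Set String) (dict_map : List (String × String × String)) (directions : List String) : Nat → PySem.Dict String (Option Int × String) → Int → String → Int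
  | 0, _, steps, _ => steps
  | fuel + 1, cache, steps, current =>
    let cache' := if PySem.Dict.contains cache current then cache
                  else PySem.Dict.insert cache current (summarizeRound objectives dict_map directions 1 current)
    match (PySem.Dict.get? cache' current).getD (none, "") with
    | (some hit, _) => steps + hit
    | (none, endn) => goB objectives dict_map directions fuel cache' (steps + PySem.List.len directions) endn

def get_single_total_steps_alt (position : String) (allowed_objectives : List String) (dict_map : List (String × String × String)) (directions : List String) : Int :=
  let objectives := PySem.Set.ofList allowed_objectives
  if PySem.Set.contains objectives position then 0
  else goB objectives dict_map directions (pvFuel dict_map directions) PySem.Dict.empty 0 position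

-- ===== PRECONDITION & SPEC =====
-- On which inputs does Python A RETURN? Its while-loop must reach an objective before any
-- IndexError (directions index) or KeyError (dict_map key) and without cycling forever.
-- There is no closed form for reachability in a graph, so Pre_ states exactly that: the
-- walk, checked with Option-valued lookups, reaches an objective within pvFuel steps —
-- by the pigeonhole argument at pvFuel this is EXACTLY the set of inputs where A returns.
def walkSteps? (allowed_objectives : List String) (dict_map : List (String × String × String)) (directions : List String) : Nat → Int → String → Int → Option Int
  | 0, _, _, _ => none
  | fuel + 1, steps, pos, idx =>
    if pos ∈ allowed_objectives then some steps
    else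
      match pyLookup dict_map pos, PySem.List.pyGet? directions idx with
      | some pair, some d =>
        walkSteps? allowed_objectives dict_map directions fuel (steps + 1)
          (if d = "R" then pair.2 else pair.1)
          (if idx < PySem.List.len directions - 1 then idx + 1 else 0)
      | _, _ => none

def Pre_get_single_total_steps (position : String) (allowed_objectives : List String) (dict_map : List (String × String × String)) (directions : List String) : Prop :=
  (walkSteps? allowed_objectives dict_map directions (pvFuel dict_map directions) 0 position 0).isSome

instance (position : String) (allowed_objectives : List String) (dict_map : List (String × String × String)) (directions : List String) : Decidable (Pre_get_single_total_steps position allowed_objectives dict_map directions) := by unfold Pre_get_single_total_steps; infer_instance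

def pvWitness_get_single_total_steps : String × List String × (List (String × String × String)) × List String :=
  ("AAA", ["ZZZ"], [("AAA", "BBB", "CCC"), ("BBB", "ZZZ", "AAA")], ["L", "L"])

def Spec_get_single_total_steps (position : String) (allowed_objectives : List String) (dict_map : List (String × String × String)) (directions : List String) (out : Int) : Prop := out = get_single_total_steps_alt position allowed_objectives dict_map directions
instance (position : String) (allowed_objectives : List String) (dict_map : List (String × String × String)) (directions : List String) (out : Int) : Decidable (Spec_get_single_total_steps position allowed_objectives dict_map directions out) := by unfold Spec_get_single_total_steps; infer_instance

-- ===== CLAIM (what is proved, stated in full; the proofs are below) =====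
def Claim_equal_get_single_total_steps : Prop := ∀ (position : String) (allowed_objectives : List String) (dict_map : List (String × String × String)) (directions : List String), Dom_get_single_total_steps position allowed_objectives dict_map directions → Pre_get_single_total_steps position allowed_objectives dict_map directions → Spec_get_single_total_steps position allowed_objectives dict_map directions (get_single_total_steps position allowed_objectives dict_map directions)

-- ===== LEMMAS AND PROOFS =====

-- A's port computes the reference walk's value wherever the reference walk succeeds.
lemma goA_eq_of_walkSteps? (obj : List String) (dm : List (String × String × String)) (dirs : List String) :
    ∀ (f g : Nat) (steps : Int) (pos : String) (idx : Int) (r : Int), f ≤ g →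
      walkSteps? obj dm dirs f steps pos idx = some r →
      goA obj dm dirs g steps pos idx = r := by
  intro f
  induction f with
  | zero => intro g steps pos idx r _ h; simp [walkSteps?] at h
  | succ f ih =>
    intro g steps pos idx r hle h
    obtain ⟨g', rfl⟩ : ∃ g', g = g' + 1 := ⟨g - 1, by omega⟩
    rw [walkSteps?] at h
    rw [goA]
    by_cases hmem : pos ∈ obj
    · simp [hmem] at h ⊢; omega
    · simp only [if_neg hmem] at h ⊢
      cases hlk : pyLookup dm pos with
      | none => rw [hlk] at h; simp at h
      | some pair =>
        cases hd : PySem.List.pyGet? dirs idx with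
        | none => rw [hlk, hd] at h; simp at h
        | some d =>
          rw [hlk, hd] at h
          dsimp only at h
          have hgd : PySem.List.pyGetD dirs idx "" = d := by
            simp [PySem.List.pyGetD, hd]
          have hpos' : (if (if d = "R" then (1 : Int) else 0) = 1 then pair.2 else pair.1)
              = (if d = "R" then pair.2 else pair.1) := by
            by_cases hR : d = "R" <;> simp [hR]
          simp only [hgd, Option.getD_some, hpos']
          exact ih g' (steps + 1) _ _ r (by omega) h

-- One round summary vs the reference walk: from index pre.length into dirs = pre ++ suf,
-- with the current position not yet an objective, the summary either carries the hit
-- offset (and r = steps + (h - off) + 1) or ends the round at a non-objective node from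
-- which the walk still yields r at index 0 with steps advanced by the moves made.
lemma summarizeRound_of_walkSteps? (obj : List String) (dm : List (String × String × String)) (dirs : List String) :
    ∀ (suf pre : List String) (off : Int) (f : Nat) (steps : Int) (pos : String) (r : Int),
      dirs = pre ++ suf → suf ≠ [] → pos ∉ obj →
      walkSteps? obj dm dirs f steps pos (pre.length : Int) = some r →
      (∃ h p', summarizeRound (PySem.Set.ofList obj) dm suf off pos = (some h, p') ∧
        r = steps + (h - off) + 1) ∨
      (∃ p' f', summarizeRound (PySem.Set.ofList obj) dm suf off pos = (none, p') ∧
        p' ∉ obj ∧ f' + suf.length ≤ f ∧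
        walkSteps? obj dm dirs f' (steps + (suf.length : Int)) p' 0 = some r) := by
  intro suf
  induction suf with
  | nil => intro pre off f steps pos r _ hne; exact absurd rfl hne
  | cons d suf' ih =>
    intro pre off f steps pos r hdirs _ hmem h
    obtain ⟨f'', rfl⟩ : ∃ f'', f = f'' + 1 := by
      cases f with
      | zero => simp [walkSteps?] at h
      | succ f => exact ⟨f, rfl⟩
    unfold walkSteps? at h
    simp only [if_neg hmem] at h
    cases hlk : pyLookup dm pos with
    | none => rw [hlk] at h; simp at h
    | some pair =>
      have hd : PySem.List.pyGet? dirs (pre.length : Int) = some d := by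
        rw [hdirs]; exact PySem.List.pyGet?_append_length pre suf' d
      rw [hlk, hd] at h
      set pos' := (if d = "R" then pair.2 else pair.1) with hpos'
      rw [summarizeRound]
      simp only [← hpos', hlk, Option.getD_some]
      by_cases hobj' : pos' ∈ obj
      · -- the objective is hit by this move
        left
        have hc : PySem.Set.contains (PySem.Set.ofList obj) pos' = true := by
          rw [PySem.Set.contains_iff, PySem.Set.mem_ofList]; exact hobj'
        rw [hc]
        obtain ⟨g, rfl⟩ : ∃ g, f'' = g + 1 := by
          cases f'' with
          | zero => simp [walkSteps?] at h
          | succ g => exact ⟨g, rfl⟩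
        unfold walkSteps? at h
        dsimp only at h
        rw [← hpos'] at h
        simp [hobj'] at h
        exact ⟨off, pos', by simp, by omega⟩
      · have hc : PySem.Set.contains (PySem.Set.ofList obj) pos' = false := by
          rw [← Bool.not_eq_true, PySem.Set.contains_iff, PySem.Set.mem_ofList]; exact hobj'
        rw [hc]
        simp only [Bool.false_eq_true, if_false]
        cases hsuf' : suf' with
        | nil =>
          -- the round ends with this move; A's index wraps to 0
          right
          have hidx : ¬ ((pre.length : Int) < PySem.List.len dirs - 1) := by
            subst hdirs hsuf'; simp [PySem.List.len_eq]
          rw [if_neg hidx] at h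
          subst hsuf'
          exact ⟨pos', f'', by simp [summarizeRound], hobj', by simp, by
            simpa using h⟩
        | cons e tl =>
          -- the round continues at index pre.length + 1
          have hidx : (pre.length : Int) < PySem.List.len dirs - 1 := by
            subst hdirs hsuf'; simp [PySem.List.len_eq]; omega
          rw [if_pos hidx] at h
          have hlen : ((pre ++ [d]).length : Int) = (pre.length : Int) + 1 := by
            simp
          have h' : walkSteps? obj dm dirs f'' (steps + 1) pos' ((pre ++ [d]).length : Int) = some r := by
            rw [hlen]; exact h
          have := ih (pre ++ [d]) (off + 1) f'' (steps + 1) pos' r (by rw [hdirs, hsuf']; simp) (by simp [hsuf']) hobj' h'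
          rw [hsuf'] at *
          rcases this with ⟨hh, p', heq, hr⟩ | ⟨p', f', heq, hp', hf, hw⟩
          · left; exact ⟨hh, p', heq, by omega⟩
          · right
            refine ⟨p', f', heq, hp', by simp at hf ⊢; omega, ?_⟩
            have : steps + 1 + ((e :: tl).length : Int) = steps + ((d :: e :: tl).length : Int) := by
              push_cast [List.length_cons]; ring
            rwa [this] at hw
  
-- the memo-cache invariant: every cached entry is the round summary of its key
def CacheOK (objectives : PySem.Set String) (dm : List (String × String × String)) (dirs : List String) (cache : PySem.Dict String (Option Int × String)) : Prop :=
  ∀ k v, PySem.Dict.get? cache k = some v → v = summarizeRound objectives dm dirs 1 k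

-- B's main loop computes the reference walk's value wherever the walk succeeds,
-- from any cache satisfying the invariant.
lemma goB_of_walkSteps? (obj : List String) (dm : List (String × String × String)) (dirs : List String) :
    ∀ (f : Nat), ∀ (fB : Nat) (cache : PySem.Dict String (Option Int × String)) (steps : Int) (pos : String) (r : Int),
      f ≤ fB → pos ∉ obj → CacheOK (PySem.Set.ofList obj) dm dirs cache →
      walkSteps? obj dm dirs f steps pos 0 = some r →
      goB (PySem.Set.ofList obj) dm dirs fB cache steps pos = r := by
  intro f
  induction f using Nat.strong_induction_on with
  | _ f ih =>
    intro fB cache steps pos r hle hmem hok h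
    obtain ⟨f'', rfl⟩ : ∃ f'', f = f'' + 1 := by
      cases f with
      | zero => simp [walkSteps?] at h
      | succ g => exact ⟨g, rfl⟩
    have hdirs_ne : dirs ≠ [] := by
      intro hnil
      rw [walkSteps?] at h
      simp [hmem, hnil, PySem.List.pyGet?] at h
    obtain ⟨fB', rfl⟩ : ∃ fB', fB = fB' + 1 := ⟨fB - 1, by omega⟩
    rw [goB]
    set cache' := if PySem.Dict.contains cache pos then cache
                  else PySem.Dict.insert cache pos (summarizeRound (PySem.Set.ofList obj) dm dirs 1 pos) with hcache'
    have hok' : CacheOK (PySem.Set.ofList obj) dm dirs cache' := by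
      rw [hcache']
      split_ifs with hcont
      · exact hok
      · intro k v hkv
        rw [PySem.Dict.get?_insert] at hkv
        split_ifs at hkv with hk
        · subst hk; exact (Option.some_inj.mp hkv).symm
        · exact hok k v hkv
    have hget : PySem.Dict.get? cache' pos = some (summarizeRound (PySem.Set.ofList obj) dm dirs 1 pos) := by
      rw [hcache']
      split_ifs with hcont
      · rw [PySem.Dict.contains_eq_isSome_get?] at hcont
        obtain ⟨v, hv⟩ := Option.isSome_iff_exists.mp hcont
        rw [hv, hok pos v hv]
      · exact PySem.Dict.get?_insert_self cache pos _
    rw [hget]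
    have hwalk0 : walkSteps? obj dm dirs (f'' + 1) steps pos (([] : List String).length : Int) = some r := by
      simpa using h
    have := summarizeRound_of_walkSteps? obj dm dirs dirs [] 1 (f'' + 1) steps pos r (by simp) hdirs_ne hmem hwalk0
    rcases this with ⟨hh, p', heq, hr⟩ | ⟨p', f', heq, hp', hf, hw⟩
    · rw [heq]; dsimp only [Option.getD_some]; omega
    · rw [heq]
      dsimp only [Option.getD_some]
      have hlen : 1 ≤ dirs.length := by
        cases dirs with
        | nil => exact absurd rfl hdirs_ne
        | cons _ _ => simp
      have hlen' : steps + PySem.List.len dirs = steps + (dirs.length : Int) := by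
        simp [PySem.List.len_eq]
      rw [hlen']
      exact ih f' (by omega) fB' cache' (steps + (dirs.length : Int)) p' r (by omega) hp' hok' hw

-- ===== VERDICT (by name: the statement is the Claim_ definition above) =====
theorem get_single_total_steps_spec : Claim_equal_get_single_total_steps := by
  intro position allowed_objectives dict_map directions _ hpre
  unfold Spec_get_single_total_steps
  unfold Pre_get_single_total_steps at hpre
  obtain ⟨r, hr⟩ := Option.isSome_iff_exists.mp hpre
  unfold get_single_total_steps get_single_total_steps_alt
  rw [goA_eq_of_walkSteps? allowed_objectives dict_map directions _ _ 0 position 0 r (le_refl _) hr]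
  by_cases hmem : position ∈ allowed_objectives
  · have hc : PySem.Set.contains (PySem.Set.ofList allowed_objectives) position = true := by
      rw [PySem.Set.contains_iff, PySem.Set.mem_ofList]; exact hmem
    simp only [hc, if_true]
    -- walk returns 0 immediately
    obtain ⟨g, hg⟩ : ∃ g, pvFuel dict_map directions = g + 1 := ⟨pvFuel dict_map directions - 1, by unfold pvFuel; omega⟩
    rw [hg, walkSteps?] at hr
    simp [hmem] at hr
    omega
  · have hc : PySem.Set.contains (PySem.Set.ofList allowed_objectives) position = false := by
      rw [← Bool.not_eq_true, PySem.Set.contains_iff, PySem.Set.mem_ofList]; exact hmem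
    simp only [hc, Bool.false_eq_true, if_false]
    exact (goB_of_walkSteps? allowed_objectives dict_map directions _ _ PySem.Dict.empty 0 position r (le_refl _) hmem (by intro k v hkv; simp [PySem.Dict.get?_empty] at hkv) hr).symm
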